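-- pv_equiv track=rewrite | github.com/wisdomtohe/CompetitiveProgramming | Mine/marathon2019/arrayPairs.py | handle_array
-- ===== SOURCE A (Python) =====
-- def handle_array(array):
-- 	nombre = 0
-- 	for i in range(len(array)-1):
-- 		j=i+1
-- 		for j in range(len(array)-1):
-- 			if (array[i]*i) > (array[j]*j):
-- 				nombre += 1
--
-- 	return nombre
-- ===== SOURCE B (Python) =====
-- def handle_array(array):
--     total = 0
--     counts = {}
--     for k in range(len(array) - 1):
--         x = array[k] * k
--         total += k - counts.get(x, 0)
--         counts[x] = counts.get(x, 0) + 1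
--     return total
-- ===== Notes on version B (the rewrite author's own statement) =====
-- stated objective: faster
-- what changed: Replaced A's nested double loop (comparing array[i]*i against array[j]*j for every pair) by a single pass that keeps a dict of counts of the values seen so far: each new value at index k contributes k minus the count of equal previous values, since each unordered pair of distinct values yields exactly one ordered '>' pair.
import Mathlib
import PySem

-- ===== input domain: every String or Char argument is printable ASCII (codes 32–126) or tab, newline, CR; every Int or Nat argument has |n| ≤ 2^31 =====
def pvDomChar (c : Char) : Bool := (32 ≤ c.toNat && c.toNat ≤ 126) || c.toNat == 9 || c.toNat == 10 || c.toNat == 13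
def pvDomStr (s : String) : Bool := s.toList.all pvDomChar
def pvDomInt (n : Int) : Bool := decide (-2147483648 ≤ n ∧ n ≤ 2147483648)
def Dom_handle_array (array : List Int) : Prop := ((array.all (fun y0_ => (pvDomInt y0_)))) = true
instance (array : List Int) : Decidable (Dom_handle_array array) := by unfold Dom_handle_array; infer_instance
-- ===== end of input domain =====

-- B replaces A's nested double loop by a single pass with a dict of value counts (alternative, one pass instead of two nested).

-- ===== PORT A =====
-- indices i, j always lie in range(len(array)-1), so pyGetD is exact here
def handle_array (array : List Int) : Int :=
  (PySem.List.pyRange 0 (PySem.List.len array - 1) 1).foldl (fun nombre i =>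
    (PySem.List.pyRange 0 (PySem.List.len array - 1) 1).foldl (fun nombre j =>
      if PySem.List.pyGetD array j 0 * j < PySem.List.pyGetD array i 0 * i then nombre + 1
      else nombre) nombre) 0

-- ===== PORT B =====
def handle_array_alt (array : List Int) : Int :=
  let st := (PySem.List.pyRange 0 (PySem.List.len array - 1) 1).foldl
    (fun (s : PySem.Dict Int Int × Int) k =>
      let x := PySem.List.pyGetD array k 0 * k
      (s.1.insert x (s.1.getD x 0 + 1), s.2 + k - s.1.getD x 0))
    (PySem.Dict.empty, 0)
  st.2

-- ===== PRECONDITION & SPEC =====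
def Spec_handle_array (array : List Int) (out : Int) : Prop := out = handle_array_alt array
instance (array : List Int) (out : Int) : Decidable (Spec_handle_array array out) := by unfold Spec_handle_array; infer_instance

-- ===== CLAIM (what is proved, stated in full; the proofs are below) =====
def Claim_equal_handle_array : Prop := ∀ (array : List Int), Dom_handle_array array → Spec_handle_array array (handle_array array)

-- ===== LEMMAS AND PROOFS =====

-- pvF l = number of ordered pairs (i, j) with l[i] > l[j] — what A's double loop counts
def pvF (l : List Int) : Int :=
  (l.map (fun z => ((l.countP (fun y => decide (y < z))) : Int))).sum

-- the body of B's loop, abstracted over the per-index value function f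
def pvStep (f : Int → Int) : (PySem.Dict Int Int × Int) → Int → (PySem.Dict Int Int × Int) :=
  fun s k => (s.1.insert (f k) (s.1.getD (f k) 0 + 1), s.2 + k - s.1.getD (f k) 0)

def pvR (N : Nat) : List Int := (List.range N).map (fun k => (Int.ofNat k))

def pvW (f : Int → Int) (N : Nat) : List Int := (List.range N).map (fun k => f (Int.ofNat k))

lemma pvR_succ (N : Nat) : pvR (N + 1) = pvR N ++ [(N : Int)] := by
  simp [pvR, List.range_succ]

lemma pvW_succ (f : Int → Int) (N : Nat) : pvW f (N + 1) = pvW f N ++ [f (N : Int)] := by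
  simp [pvW, List.range_succ]

lemma pvW_length (f : Int → Int) (N : Nat) : (pvW f N).length = N := by
  simp [pvW]

-- trichotomy of counts
lemma pv_trich (x : Int) (p : List Int) :
    p.countP (fun y => decide (x < y)) + p.countP (fun y => decide (y < x)) + p.count x = p.length := by
  induction p with
  | nil => simp
  | cons y t ih =>
    simp only [List.countP_cons, List.count_cons, List.length_cons]
    rcases lt_trichotomy x y with h | h | h
    · simp [h, not_lt_of_gt h, h.ne']
      omega
    · subst h
      simp
      omega
    · simp [h, not_lt_of_gt h, h.ne]
      omega

lemma pv_sum_map_add {α : Type} (g h : α → Int) (l : List α) :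
    (l.map (fun z => g z + h z)).sum = (l.map g).sum + (l.map h).sum := by
  induction l with
  | nil => simp
  | cons y t ih => simp [ih]; ring

lemma pv_sum_ite (x : Int) (p : List Int) :
    (p.map (fun z => if x < z then (1 : Int) else 0)).sum
      = (p.countP (fun z => decide (x < z)) : Int) := by
  induction p with
  | nil => simp
  | cons y t ih =>
    by_cases h : x < y <;> simp [h, ih]; omega

lemma pvF_append (p : List Int) (x : Int) :
    pvF (p ++ [x]) = pvF p + p.length - p.count x := by
  unfold pvF
  simp only [List.map_append, List.sum_append, List.countP_append, List.map_cons,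
    List.map_nil, List.sum_cons, List.sum_nil]
  have h1 : ([x].countP (fun y => decide (y < x))) = 0 := by simp
  have h2 : ∀ z : Int, ([x].countP (fun y => decide (y < z))) = if x < z then 1 else 0 := by
    intro z; by_cases h : x < z <;> simp [h]
  simp only [h1, h2]
  have h3 : (p.map (fun z => ((p.countP (fun y => decide (y < z)) + if x < z then 1 else 0 : ℕ) : Int))).sum
      = (p.map (fun z => (((p.countP (fun y => decide (y < z))) : Int) + if x < z then (1 : Int) else 0))).sum := by
    congr 1
    apply List.map_congr_left
    intro z _
    push_cast
    rfl
  rw [h3, pv_sum_map_add, pv_sum_ite]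
  have := pv_trich x p
  omega

-- the single-pass loop of B: the dict holds the counts of the prefix, the total is pvF of the prefix
lemma pv_loop (f : Int → Int) (N : Nat) :
    (∀ z : Int, ((pvR N).foldl (pvStep f) (PySem.Dict.empty, 0)).1.getD z 0
        = (((pvW f N).count z) : Int))
    ∧ ((pvR N).foldl (pvStep f) (PySem.Dict.empty, 0)).2 = pvF (pvW f N) := by
  induction N with
  | zero => constructor <;> simp [pvR, pvW, pvF, PySem.Dict.getD_empty]
  | succ n ih =>
    obtain ⟨ihd, iht⟩ := ih
    rw [pvR_succ, List.foldl_append, List.foldl_cons, List.foldl_nil]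
    constructor
    · intro z
      show ((((pvR n).foldl (pvStep f) (PySem.Dict.empty, 0)).1.insert _ _).getD z 0) = _
      rw [PySem.Dict.getD_insert]
      by_cases hz : z = f (n : Int)
      · simp [hz, ihd, pvW_succ, List.count_append]
      · simp only [hz, if_false]
        rw [ihd, pvW_succ, List.count_append]
        have : [f (n : Int)].count z = 0 := by
          simp [List.count_singleton]
          intro h; exact absurd h.symm hz
        simp [this]
    · show ((pvR n).foldl (pvStep f) (PySem.Dict.empty, 0)).2 + (n : Int)
          - (((pvR n).foldl (pvStep f) (PySem.Dict.empty, 0)).1.getD (f (n : Int)) 0)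
          = _
      rw [iht, ihd, pvW_succ, pvF_append, pvW_length]

lemma pv_foldl_congr {α β : Type} (l : List α) (g h : β → α → β) (H : ∀ b a, g b a = h b a)
    (init : β) : l.foldl g init = l.foldl h init := by
  have : g = h := by funext b a; exact H b a
  rw [this]

-- A's double loop over range N computes pvF
lemma pv_A_eval (f : Int → Int) (N : Nat) :
    (pvR N).foldl (fun nombre i =>
      (pvR N).foldl (fun nombre j =>
        if f j < f i then nombre + 1 else nombre) nombre) 0
    = pvF (pvW f N) := by
  have hinner : ∀ (i a : Int),
      (pvR N).foldl (fun nombre j => if f j < f i then nombre + 1 else nombre) a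
      = a + (((pvR N).countP (fun j => decide (f j < f i))) : Int) := by
    intro i a
    rw [PySem.List.foldl_ite_add_one]
  rw [pv_foldl_congr (pvR N) _
    (fun nombre i => nombre + (((pvR N).countP (fun j => decide (f j < f i))) : Int))
    (fun a i => hinner i a) 0]
  rw [PySem.List.foldl_add]
  unfold pvF pvW pvR
  simp [List.countP_map, List.map_map, Function.comp_def]

-- ===== VERDICT (by name: the statement is the Claim_ definition above) =====
theorem handle_array_spec : Claim_equal_handle_array := by
  unfold Claim_equal_handle_array
  intro array _
  unfold Spec_handle_array handle_array handle_array_alt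
  have hR : PySem.List.pyRange 0 (PySem.List.len array - 1) 1
      = pvR (PySem.List.len array - 1).toNat := by
    rw [PySem.List.pyRange_one]; simp only [Int.sub_zero, zero_add, pvR, Int.ofNat_eq_natCast]
  rw [hR]
  have hA := pv_A_eval (fun i => PySem.List.pyGetD array i 0 * i) (PySem.List.len array - 1).toNat
  have hB := (pv_loop (fun i => PySem.List.pyGetD array i 0 * i) (PySem.List.len array - 1).toNat).2
  exact hA.trans hB.symm
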